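-- pv_equiv track=rewrite | github.com/NousResearch/atropos | environments/tool_use_turnlevel_advantage_server.py | _check_sequential_tools
-- ===== SOURCE A (Python) =====
-- from typing import Any, Dict, List, Optional, Tuple
--
-- def _check_sequential_tools(conv: List[Dict[str, str]]) -> bool:
--     """Check if tool calls follow sequential pattern."""
--     tool_indices = [
--         i
--         for i, m in enumerate(conv)
--         if m["from"] in ("gpt", "assistant") and "<tool_call>" in m["value"].lower()
--     ]
--     if not tool_indices:
--         return False
--
--     for i in range(len(tool_indices) - 1):
--         start, end = tool_indices[i], tool_indices[i + 1]
--         in_between = conv[start + 1 : end]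
--         if any(m["from"] != "tool" for m in in_between):
--             return False
--
--     last_tool_idx = tool_indices[-1]
--     next_responses = [
--         i
--         for i, m in enumerate(conv[last_tool_idx + 1 :], start=last_tool_idx + 1)
--         if m["from"] == "tool"
--     ]
--     if not next_responses:
--         return False
--
--     return True
-- ===== SOURCE B (Python) =====
-- from typing import Dict, List
--
--
-- def _check_sequential_tools(conv: List[Dict[str, str]]) -> bool:
--     """Check if tool calls follow sequential pattern (single linear pass)."""
--     seen = False          # a tool call has appeared
--     non_tool_since = False  # a non-tool message appeared since the last call
--     tool_since = False      # a tool response appeared since the last call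
--     for m in conv:
--         if m["from"] in ("gpt", "assistant") and "<tool_call>" in m["value"].lower():
--             if seen and non_tool_since:
--                 return False
--             seen = True
--             non_tool_since = False
--             tool_since = False
--         elif seen:
--             if m["from"] == "tool":
--                 tool_since = True
--             else:
--                 non_tool_since = True
--     return seen and tool_since
-- ===== Notes on version B (the rewrite author's own statement) =====
-- stated objective: alternative
-- what changed: Replaced the three-phase index-list computation (build tool_indices, check every slice between consecutive indices, then scan the suffix after the last index) by a single linear pass over the conversation maintaining three flags (seen, non_tool_since, tool_since), with no index list and no slicing.
import Mathlib
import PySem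

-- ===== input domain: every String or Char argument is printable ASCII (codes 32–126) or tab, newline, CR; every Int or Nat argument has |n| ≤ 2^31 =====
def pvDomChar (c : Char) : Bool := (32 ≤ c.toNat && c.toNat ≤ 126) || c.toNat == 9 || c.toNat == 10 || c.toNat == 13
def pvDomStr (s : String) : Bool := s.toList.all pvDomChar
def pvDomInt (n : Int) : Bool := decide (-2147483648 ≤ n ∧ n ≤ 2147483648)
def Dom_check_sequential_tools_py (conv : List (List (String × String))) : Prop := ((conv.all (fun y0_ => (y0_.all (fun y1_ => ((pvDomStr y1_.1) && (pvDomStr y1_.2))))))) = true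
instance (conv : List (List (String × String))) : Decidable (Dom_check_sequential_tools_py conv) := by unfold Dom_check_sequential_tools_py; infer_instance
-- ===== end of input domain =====

-- B replaces A's three-phase index-list computation by one linear pass with three flags; equal return value on Pre_ (messages carrying the keys Python reads).

-- ===== PORT A =====
-- m["from"] (read for every message; Pre_ guarantees the key is present)
def pvFromA (m : List (String × String)) : String := PySem.Dict.getD (PySem.Dict.mk m) "from" ""
-- m["from"] in ("gpt","assistant") and "<tool_call>" in m["value"].lower()
def pvIsToolCallA (m : List (String × String)) : Bool :=
  (pvFromA m == "gpt" || pvFromA m == "assistant") &&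
    PySem.Str.isIn "<tool_call>" (PySem.Str.lower (PySem.Dict.getD (PySem.Dict.mk m) "value" ""))

def check_sequential_tools_py (conv : List (List (String × String))) : Bool :=
  let toolIndices : List Int :=
    ((PySem.List.enumerate conv).filter (fun p => pvIsToolCallA p.2)).map (fun p => p.1)
  if toolIndices.isEmpty then false
  else if (PySem.List.pyRange 0 (PySem.List.len toolIndices - 1) 1).any (fun i =>
      (PySem.List.slice conv (some (PySem.List.pyGetD toolIndices i 0 + 1))
          (some (PySem.List.pyGetD toolIndices (i + 1) 0))).any
        (fun m => pvFromA m != "tool")) then false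
  else
    let lastToolIdx := PySem.List.pyGetD toolIndices (-1) 0
    let nextResponses : List Int :=
      ((PySem.List.enumerate (PySem.List.slice conv (some (lastToolIdx + 1)) none) (lastToolIdx + 1)).filter
        (fun p => pvFromA p.2 == "tool")).map (fun p => p.1)
    if nextResponses.isEmpty then false else true

-- ===== PORT B =====
-- the loop body of Source B, with `return False` modelled as the value false
def pvGoB (seen nonToolSince toolSince : Bool) : List (List (String × String)) → Bool
  | [] => seen && toolSince
  | m :: rest =>
    if pvIsToolCallA m then
      if seen && nonToolSince then false
      else pvGoB true false false rest
    else if seen then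
      if pvFromA m == "tool" then pvGoB seen nonToolSince true rest
      else pvGoB seen true toolSince rest
    else pvGoB seen nonToolSince toolSince rest

def check_sequential_tools_py_alt (conv : List (List (String × String))) : Bool :=
  pvGoB false false false conv

-- ===== PRECONDITION & SPEC =====
-- Pre_ excludes exactly the messages on which the Python raises KeyError: every message must
-- carry "from", and "value" too when its "from" is "gpt"/"assistant" (only then is it read).
def Pre_check_sequential_tools_py (conv : List (List (String × String))) : Prop :=
  ∀ m ∈ conv, (PySem.Dict.mk m).contains "from" = true ∧
    ((PySem.Dict.getD (PySem.Dict.mk m) "from" "" = "gpt" ∨ PySem.Dict.getD (PySem.Dict.mk m) "from" "" = "assistant") →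
      (PySem.Dict.mk m).contains "value" = true)
instance (conv : List (List (String × String))) : Decidable (Pre_check_sequential_tools_py conv) := by
  unfold Pre_check_sequential_tools_py; infer_instance

def pvWitness_check_sequential_tools_py : (List (List (String × String))) :=
  [[("from", "gpt"), ("value", "<tool_call>")], [("from", "tool"), ("value", "ok")]]

def Spec_check_sequential_tools_py (conv : List (List (String × String))) (out : Bool) : Prop := out = check_sequential_tools_py_alt conv
instance (conv : List (List (String × String))) (out : Bool) : Decidable (Spec_check_sequential_tools_py conv out) := by unfold Spec_check_sequential_tools_py; infer_instance

-- ===== CLAIM (what is proved, stated in full; the proofs are below) =====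
def Claim_equal_check_sequential_tools_py : Prop := ∀ (conv : List (List (String × String))), Dom_check_sequential_tools_py conv → Pre_check_sequential_tools_py conv → Spec_check_sequential_tools_py conv (check_sequential_tools_py conv)

-- ===== LEMMAS AND PROOFS =====

-- Nat-indexed list of the tool-call positions of conv (proof-side normal form of A's tool_indices)
def pvTIN : List (List (String × String)) → List Nat
  | [] => []
  | m :: r => (if pvIsToolCallA m then [0] else []) ++ (pvTIN r).map Nat.succ

-- proof-side normal form of A's pair loop
def pvPairsAny (conv : List (List (String × String))) : List Nat → Bool
  | s :: e :: rest =>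
    ((conv.drop (s + 1)).take (e - (s + 1))).any (fun m => pvFromA m != "tool") || pvPairsAny conv (e :: rest)
  | _ => false

-- proof-side normal form of A
def pvAnf (conv : List (List (String × String))) : Bool :=
  match pvTIN conv with
  | [] => false
  | t :: ts => !pvPairsAny conv (t :: ts) && (conv.drop ((t :: ts).getLastD 0 + 1)).any (fun m => pvFromA m == "tool")


theorem pvTIN_nil_iff (r : List (List (String × String))) :
    pvTIN r = [] ↔ r.any pvIsToolCallA = false := by
  induction r with
  | nil => simp [pvTIN]
  | cons m r ih =>
    by_cases h : pvIsToolCallA m = true <;> simp [pvTIN, h, ih]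

theorem pvGoB_no_call (r : List (List (String × String))) (h : pvTIN r = []) :
    ∀ nts ts, pvGoB true nts ts r = (ts || r.any (fun m => pvFromA m == "tool")) := by
  induction r with
  | nil => simp [pvGoB]
  | cons m r ih =>
    intro nts ts
    cases hm : pvIsToolCallA m with
    | true => simp [pvTIN, hm] at h
    | false =>
      have hr : pvTIN r = [] := by simpa [pvTIN, hm] using h
      by_cases ht : (pvFromA m == "tool") = true <;>
        simp [pvGoB, show pvIsToolCallA m = false from hm, ht, ih hr]

theorem pvGoB_nts (r : List (List (String × String))) (h : r.any pvIsToolCallA = true) :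
    ∀ ts, pvGoB true true ts r = false := by
  induction r with
  | nil => simp at h
  | cons m r ih =>
    intro ts
    cases hm : pvIsToolCallA m with
    | true => simp [pvGoB, show pvIsToolCallA m = true from hm]
    | false =>
      have hr : r.any pvIsToolCallA = true := by simpa [hm] using h
      by_cases ht : (pvFromA m == "tool") = true <;>
        simp [pvGoB, show pvIsToolCallA m = false from hm, ht, ih hr]

theorem pvGoB_first (r : List (List (String × String))) :
    ∀ t ts', pvTIN r = t :: ts' → ∀ ts,
      pvGoB true false ts r =
        ((r.take t).all (fun m => pvFromA m == "tool") && pvGoB false false false r) := by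
  induction r with
  | nil => intro t ts' h; simp [pvTIN] at h
  | cons m r ih =>
    intro t ts' h ts
    cases hm : pvIsToolCallA m with
    | true =>
      have ht0 : t = 0 := by simp [pvTIN, hm] at h; omega
      simp [pvGoB, show pvIsToolCallA m = true from hm, ht0]
    | false =>
      simp only [pvTIN, hm, Bool.false_eq_true, if_false, List.nil_append] at h
      cases hq : pvTIN r with
      | nil => rw [hq] at h; simp at h
      | cons a l =>
        rw [hq] at h
        have hta : a + 1 = t := by simpa using congrArg (fun x => x.headD 0) h
        by_cases htool : (pvFromA m == "tool") = true
        · simp [pvGoB, show pvIsToolCallA m = false from hm, htool, ih _ _ hq, ← hta]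
        · have hc : r.any pvIsToolCallA = true := by
            cases ha : r.any pvIsToolCallA
            · rw [← pvTIN_nil_iff] at ha; simp [ha] at hq
            · rfl
          simp [pvGoB, show pvIsToolCallA m = false from hm, htool, pvGoB_nts r hc, ← hta]

theorem pvPairsAny_shift (conv : List (List (String × String))) (m : List (String × String)) :
    ∀ l : List Nat, pvPairsAny (m :: conv) (l.map Nat.succ) = pvPairsAny conv l := by
  intro l
  induction l with
  | nil => simp [pvPairsAny]
  | cons s l ih =>
    cases l with
    | nil => simp [pvPairsAny]
    | cons e l =>
      simp only [List.map_cons] at ih ⊢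
      rw [pvPairsAny, pvPairsAny, ih]
      have hdrop : (m :: conv).drop (s.succ + 1) = conv.drop (s + 1) := rfl
      have htake : e.succ - (s.succ + 1) = e - (s + 1) := by omega
      rw [hdrop, htake]

theorem pvGetLastD_succ : ∀ (t : Nat) (ts : List Nat),
    ((t :: ts).map Nat.succ).getLastD 0 = (t :: ts).getLastD 0 + 1 := by
  intro t ts
  induction ts generalizing t with
  | nil => rfl
  | cons a l ih => simpa using ih a

theorem pv_Anf_eq_B (conv : List (List (String × String))) :
    pvAnf conv = pvGoB false false false conv := by
  induction conv with
  | nil => rfl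
  | cons m r ih =>
    cases hm : pvIsToolCallA m with
    | false =>
      have hB : pvGoB false false false (m :: r) = pvGoB false false false r := by
        simp [pvGoB, show pvIsToolCallA m = false from hm]
      rw [hB, ← ih]
      unfold pvAnf
      cases hq : pvTIN r with
      | nil => simp [pvTIN, hm, hq]
      | cons t ts =>
        simp only [pvTIN, hm, Bool.false_eq_true, if_false, List.nil_append, hq, List.map_cons]
        rw [show (Nat.succ t :: List.map Nat.succ ts) = (t :: ts).map Nat.succ from rfl,
            pvGetLastD_succ, pvPairsAny_shift r m (t :: ts)]
        rfl
    | true =>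
      cases hq : pvTIN r with
      | nil =>
        have hB : pvGoB false false false (m :: r) = pvGoB true false false r := by
          simp [pvGoB, show pvIsToolCallA m = true from hm]
        rw [hB, pvGoB_no_call r hq]
        unfold pvAnf
        simp [pvTIN, hm, hq, pvPairsAny, pvFromA, pvFromA]
      | cons t ts =>
        have hB : pvGoB false false false (m :: r) = pvGoB true false false r := by
          simp [pvGoB, show pvIsToolCallA m = true from hm]
        rw [hB, pvGoB_first r t ts hq false, ← ih]
        unfold pvAnf
        simp only [pvTIN, hm, if_true, hq, List.map_cons, List.cons_append, List.nil_append]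
        rw [pvPairsAny]
        rw [show (Nat.succ t :: List.map Nat.succ ts) = (t :: ts).map Nat.succ from rfl,
            pvPairsAny_shift r m (t :: ts)]
        have h0 : (0 :: (t :: ts).map Nat.succ).getLastD 0 = ((t :: ts).map Nat.succ).getLastD 0 := by
          simp
        rw [h0, pvGetLastD_succ]
        have hdrop : (m :: r).drop ((t :: ts).getLastD 0 + 1 + 1) = r.drop ((t :: ts).getLastD 0 + 1) := rfl
        have htk : ((m :: r).drop (0 + 1)).take (Nat.succ t - (0 + 1)) = r.take t := by simp
        rw [hdrop, htk]
        have hall : (!(r.take t).any (fun m => pvFromA m != "tool")) = (r.take t).all (fun m => pvFromA m == "tool") := by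
          simp [List.all_eq_not_any_not, pvFromA, pvFromA, bne]
        cases h1 : pvPairsAny r (t :: ts) <;> cases h2 : (r.take t).any (fun m => pvFromA m != "tool") <;>
          simp_all

theorem pvEnumShift {α : Type} (xs : List α) : ∀ s : Int,
    PySem.List.enumerate xs (s + 1) = (PySem.List.enumerate xs s).map (fun p => (p.1 + 1, p.2)) := by
  induction xs with
  | nil => intro s; simp [PySem.List.enumerate_nil]
  | cons x xs ih =>
    intro s
    rw [PySem.List.enumerate_cons, PySem.List.enumerate_cons, List.map_cons, ← ih (s + 1)]

theorem pvFilterShift {α : Type} (l : List (Int × α)) (q : α → Bool) :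
    ((l.map (fun p => (p.1 + 1, p.2))).filter (fun p => q p.2)).map (fun p => p.1)
      = ((l.filter (fun p => q p.2)).map (fun p => p.1)).map (fun i => i + 1) := by
  induction l with
  | nil => simp
  | cons a l ih =>
    by_cases h : q a.2 = true <;> simp [h, ih]

theorem pvMapSucc (l : List Nat) :
    ((l.map Int.ofNat).map (fun i => i + 1)) = (l.map Nat.succ).map Int.ofNat := by
  simp only [List.map_map]
  exact List.map_congr_left (fun a _ => by simp)

theorem pvTI_eq (conv : List (List (String × String))) :
    ((PySem.List.enumerate conv).filter (fun p => pvIsToolCallA p.2)).map (fun p => p.1)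
      = (pvTIN conv).map Int.ofNat := by
  induction conv with
  | nil => simp [PySem.List.enumerate_nil, pvTIN]
  | cons m r ih =>
    rw [PySem.List.enumerate_cons, show (0 : Int) + 1 = 0 + 1 from rfl, pvEnumShift r 0]
    rw [List.filter_cons]
    cases hm : pvIsToolCallA m with
    | true =>
      rw [if_pos rfl, List.map_cons, pvFilterShift, ih, pvMapSucc]
      simp [pvTIN, hm]
    | false =>
      rw [if_neg (by simp), pvFilterShift, ih, pvMapSucc]
      simp [pvTIN, hm]

theorem pvRangeAny (n : Nat) (f : Int → Bool) :
    (PySem.List.pyRange 0 (n : Int) 1).any f = (List.range n).any (fun k => f k) := by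
  rw [PySem.List.pyRange_one]
  simp [List.any_map, Function.comp_def]

theorem pvGetDMap (l : List Nat) : ∀ k : Nat, (l.map Int.ofNat).getD k 0 = Int.ofNat (l.getD k 0) := by
  induction l with
  | nil => intro k; simp
  | cons a l ih =>
    intro k
    cases k with
    | zero => simp
    | succ n => rw [List.map_cons, List.getD_cons_succ, List.getD_cons_succ]; exact ih n

theorem pvNatPairs (conv : List (List (String × String))) : ∀ tin : List Nat,
    (List.range (tin.length - 1)).any (fun k =>
      ((conv.drop (tin.getD k 0 + 1)).take (tin.getD (k + 1) 0 - (tin.getD k 0 + 1))).any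
        (fun m => pvFromA m != "tool")) = pvPairsAny conv tin := by
  intro tin
  induction tin with
  | nil => simp [pvPairsAny]
  | cons s tl ih =>
    cases tl with
    | nil => simp [pvPairsAny]
    | cons e rest =>
      rw [show (s :: e :: rest : List Nat).length - 1 = ((e :: rest : List Nat).length - 1) + 1 from by simp]
      rw [List.range_succ_eq_map, List.any_cons, List.any_map, pvPairsAny, ← ih]
      congr 1

theorem pvPairs_eq (conv : List (List (String × String))) (tin : List Nat) :
    (PySem.List.pyRange 0 (PySem.List.len (tin.map Int.ofNat) - 1) 1).any (fun i =>
      (PySem.List.slice conv (some (PySem.List.pyGetD (tin.map Int.ofNat) i 0 + 1))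
          (some (PySem.List.pyGetD (tin.map Int.ofNat) (i + 1) 0))).any
        (fun m => pvFromA m != "tool")) = pvPairsAny conv tin := by
  have body : ∀ k : Nat,
      ((PySem.List.slice conv (some (PySem.List.pyGetD (tin.map Int.ofNat) (k : Int) 0 + 1))
          (some (PySem.List.pyGetD (tin.map Int.ofNat) ((k : Int) + 1) 0))).any
        (fun m => pvFromA m != "tool"))
      = ((conv.drop (tin.getD k 0 + 1)).take (tin.getD (k + 1) 0 - (tin.getD k 0 + 1))).any
          (fun m => pvFromA m != "tool") := by
    intro k
    rw [show ((k : Int) + 1) = ((k + 1 : Nat) : Int) from by norm_cast]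
    rw [PySem.List.pyGetD_natCast, PySem.List.pyGetD_natCast, pvGetDMap, pvGetDMap]
    rw [show (Int.ofNat (tin.getD k 0) + 1) = ((tin.getD k 0 + 1 : Nat) : Int) from by simp]
    rw [show (Int.ofNat (tin.getD (k + 1) 0)) = ((tin.getD (k + 1) 0 : Nat) : Int) from rfl]
    rw [PySem.List.slice_natCast]
  rw [← pvNatPairs conv tin]
  cases tin with
  | nil => simp [PySem.List.pyRange_one_eq_nil]
  | cons s tl =>
    rw [show PySem.List.len ((s :: tl : List Nat).map Int.ofNat) - 1 = (((s :: tl : List Nat).length - 1 : Nat) : Int) from by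
          simp [PySem.List.len_eq]]
    rw [pvRangeAny]
    exact congrArg _ (funext fun k => body k)

theorem pvGetLast_eq_getLastD (t : Nat) (ts : List Nat) :
    (t :: ts).getLast (by simp) = (t :: ts).getLastD 0 := by
  rw [List.getLastD_eq_getLast?, List.getLast?_eq_some_getLast (by simp)]
  rfl

theorem pvLastMap (t : Nat) (ts : List Nat) :
    PySem.List.pyGetD ((t :: ts).map Int.ofNat) (-1) 0 = Int.ofNat ((t :: ts).getLastD 0) := by
  rw [PySem.List.pyGetD_neg_one ((t :: ts).map Int.ofNat) 0 (by simp)]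
  rw [List.getLast_map]
  rw [pvGetLast_eq_getLastD]

theorem pvSuffixEmpty (xs : List (List (String × String))) : ∀ s : Int,
    ((((PySem.List.enumerate xs s).filter (fun p => pvFromA p.2 == "tool")).map (fun p => p.1)).isEmpty)
      = !xs.any (fun m => pvFromA m == "tool") := by
  induction xs with
  | nil => intro s; simp [PySem.List.enumerate_nil]
  | cons x xs ih =>
    intro s
    rw [PySem.List.enumerate_cons, List.filter_cons]
    by_cases h : (pvFromA x == "tool") = true <;> simp [h, ih]

theorem pv_A_eq_Anf (conv : List (List (String × String))) :
    check_sequential_tools_py conv = pvAnf conv := by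
  unfold check_sequential_tools_py
  simp only [pvTI_eq]
  cases hq : pvTIN conv with
  | nil => simp [pvAnf, hq]
  | cons t ts =>
    rw [if_neg (by simp)]
    simp only [pvPairs_eq conv (t :: ts)]
    cases hp : pvPairsAny conv (t :: ts) with
    | true => simp [pvAnf, hq, hp]
    | false =>
      simp only [Bool.false_eq_true, if_false]
      rw [pvLastMap t ts]
      rw [show (Int.ofNat ((t :: ts).getLastD 0) + 1) = ((((t :: ts).getLastD 0 + 1 : Nat)) : Int) from by simp]
      rw [PySem.List.slice_from_natCast]
      simp only [pvSuffixEmpty]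
      have hA : pvAnf conv = (!pvPairsAny conv (t :: ts) &&
          (List.drop ((t :: ts).getLastD 0 + 1) conv).any fun m => pvFromA m == "tool") := by
        unfold pvAnf
        rw [hq]
      rw [hA, hp]
      simp only [List.getLastD_eq_getLast?]
      cases hd : (List.drop ((t :: ts).getLast?.getD 0 + 1) conv).any (fun m => pvFromA m == "tool") <;>
        simp_all

-- ===== VERDICT (by name: the statement is the Claim_ definition above) =====
theorem check_sequential_tools_py_spec : Claim_equal_check_sequential_tools_py := by
  intro conv _ _
  unfold Spec_check_sequential_tools_py check_sequential_tools_py_alt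
  rw [pv_A_eq_Anf, pv_Anf_eq_B]
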